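-- pv_equiv track=rewrite | github.com/TreyEverson/CS313E | Reducible.py | step_size
-- ===== SOURCE A (Python) =====
-- def step_size(s, const):
--     hash_val = 0
--     pow26 = 1
--     for i in range(len(s) - 1, -1, -1):
--         letter = ord(s[i]) - 96
--         hash_val += pow26 * letter
--         pow26 *= 26
--     return const - (hash_val % const)
-- ===== SOURCE B (Python) =====
-- def step_size(s, const):
--     hash_val = 0
--     for c in s:
--         hash_val = hash_val * 26 + (ord(c) - 96)
--     return const - (hash_val % const)
-- ===== Notes on version B (the rewrite author's own statement) =====
-- stated objective: idiomatic
-- what changed: Replaces the reversed index loop that maintains an explicit pow26 power accumulator with a left-to-right Horner fold over the characters, dropping both the index arithmetic and the power variable.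
-- outside the precondition, e.g. on step_size('abc', 0): A raises ZeroDivisionError, B raises ZeroDivisionError
import Mathlib
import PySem

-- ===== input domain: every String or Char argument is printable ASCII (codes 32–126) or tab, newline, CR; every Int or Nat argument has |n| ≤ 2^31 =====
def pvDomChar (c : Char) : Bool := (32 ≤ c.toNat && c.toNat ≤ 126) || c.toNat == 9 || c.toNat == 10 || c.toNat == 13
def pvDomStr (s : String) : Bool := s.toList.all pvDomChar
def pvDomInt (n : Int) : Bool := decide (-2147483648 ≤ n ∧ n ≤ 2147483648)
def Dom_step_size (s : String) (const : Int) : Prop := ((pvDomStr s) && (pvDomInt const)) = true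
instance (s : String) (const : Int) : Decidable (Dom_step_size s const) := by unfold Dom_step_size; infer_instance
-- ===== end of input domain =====

-- B replaces A's reversed index loop with an explicit pow26 accumulator by a left-to-right Horner fold (idiomatic, same cost).

-- ===== PORT A =====
def step_size (s : String) (const : Int) : Int :=
  let cs := s.toList
  let st : Int × Int :=
    (PySem.List.pyRange (PySem.List.len cs - 1) (-1) (-1)).foldl
      (fun (st : Int × Int) i =>
        let letter : Int := ((PySem.List.pyGetD cs i ' ').toNat : Int) - 96
        (st.1 + st.2 * letter, st.2 * 26))
      (0, 1)
  const - PySem.Int.mod st.1 const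

-- ===== PORT B =====
def step_size_alt (s : String) (const : Int) : Int :=
  let hashVal := s.toList.foldl (fun (h : Int) (c : Char) => h * 26 + ((c.toNat : Int) - 96)) 0
  const - PySem.Int.mod hashVal const

-- ===== PRECONDITION & SPEC =====
-- Pre_ excludes const = 0, where Python A raises ZeroDivisionError.
def Pre_step_size (s : String) (const : Int) : Prop := const ≠ 0
instance (s : String) (const : Int) : Decidable (Pre_step_size s const) := by unfold Pre_step_size; infer_instance
def pvWitness_step_size : String × Int := ("cat", 7)

def Spec_step_size (s : String) (const : Int) (out : Int) : Prop := out = step_size_alt s const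
instance (s : String) (const : Int) (out : Int) : Decidable (Spec_step_size s const out) := by unfold Spec_step_size; infer_instance

-- ===== CLAIM (what is proved, stated in full; the proofs are below) =====
def Claim_equal_step_size : Prop := ∀ (s : String) (const : Int), Dom_step_size s const → Pre_step_size s const → Spec_step_size s const (step_size s const)

-- ===== LEMMAS AND PROOFS =====

-- Horner value of a character list (B's fold).
def hornerVal (cs : List Char) : Int :=
  cs.foldl (fun (h : Int) (c : Char) => h * 26 + ((c.toNat : Int) - 96)) 0

lemma hornerVal_shift (cs : List Char) (h : Int) :
    cs.foldl (fun (h : Int) (c : Char) => h * 26 + ((c.toNat : Int) - 96)) h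
      = h * 26 ^ cs.length + hornerVal cs := by
  induction cs generalizing h with
  | nil => simp [hornerVal]
  | cons c t ih =>
    simp only [List.foldl_cons, List.length_cons, hornerVal]
    rw [ih (h * 26 + ((c.toNat : Int) - 96)), ih ((0:Int) * 26 + ((c.toNat : Int) - 96))]
    ring

lemma hornerVal_cons (c : Char) (t : List Char) :
    hornerVal (c :: t) = ((c.toNat : Int) - 96) * 26 ^ t.length + hornerVal t := by
  show List.foldl _ _ (c :: t) = _
  rw [List.foldl_cons, hornerVal_shift]
  ring

-- A's reversed accumulation over the characters equals (Horner value, 26^n).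
lemma foldr_pair (cs : List Char) :
    cs.foldr (fun c (st : Int × Int) => (st.1 + st.2 * (((c.toNat : Int)) - 96), st.2 * 26)) (0, 1)
      = (hornerVal cs, 26 ^ cs.length) := by
  induction cs with
  | nil => simp [hornerVal]
  | cons c t ih =>
    simp only [List.foldr_cons, ih, hornerVal_cons, List.length_cons, Prod.mk.injEq]
    constructor <;> ring

lemma hashA_eq (cs : List Char) :
    ((PySem.List.pyRange (PySem.List.len cs - 1) (-1) (-1)).foldl
      (fun (st : Int × Int) i =>
        (st.1 + st.2 * (((PySem.List.pyGetD cs i ' ').toNat : Int) - 96), st.2 * 26))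
      (0, 1)).1 = hornerVal cs := by
  have h1 : PySem.List.pyRange (PySem.List.len cs - 1) (-1) (-1)
      = (PySem.List.pyRange 0 (PySem.List.len cs) 1).reverse := by
    rw [PySem.List.pyRange_neg_one_eq_reverse]
    norm_num
  rw [h1]
  have h3 : ((PySem.List.pyRange 0 (PySem.List.len cs) 1).reverse).foldl
      (fun (st : Int × Int) i =>
        (st.1 + st.2 * (((PySem.List.pyGetD cs i ' ').toNat : Int) - 96), st.2 * 26)) (0, 1)
      = cs.reverse.foldl
        (fun (st : Int × Int) c => (st.1 + st.2 * (((c.toNat : Int)) - 96), st.2 * 26)) (0, 1) := by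
    conv_rhs => rw [← PySem.List.map_pyGetD_pyRange_zero cs ' ', ← List.map_reverse]
    rw [List.foldl_map]
  rw [h3, List.foldl_reverse, foldr_pair]

-- ===== VERDICT (by name: the statement is the Claim_ definition above) =====
theorem step_size_spec : Claim_equal_step_size := by
  intro s const _hd _hp
  show step_size s const = step_size_alt s const
  simp only [step_size, step_size_alt]
  rw [hashA_eq s.toList]
  rfl
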